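-- pv_equiv track=rewrite | github.com/leoworqu/alx-interview | 0x0A-primegame/0-prime_game.py | calculate_grundy
-- ===== SOURCE A (Python) =====
-- def calculate_grundy(n):
--     """ Module for solving prime game question """
--     grundy = [0] * (n + 1)
--     is_prime = [True] * (n + 1)
--     is_prime[0] = is_prime[1] = False
--
--     for p in range(2, n + 1):
--         if is_prime[p]:
--             for multiple in range(p * p, n + 1, p):
--                 is_prime[multiple] = False
--                 grundy[multiple] = grundy[multiple // p] + 1
--
--     for i in range(2, n + 1):
--         if is_prime[i]:
--             grundy[i] = 1
--
--     return grundy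
-- ===== SOURCE B (Python) =====
-- def calculate_grundy(n):
--     """Smallest-prime-factor sieve, then one linear pass computing each
--     number's prime-factor count (with multiplicity) by the recurrence
--     omega[i] = omega[i // spf[i]] + 1, then map counts to A's values."""
--     spf = [0] * (n + 1)
--     for d in range(2, n + 1):
--         if spf[d] == 0:
--             for m in range(d, n + 1, d):
--                 if spf[m] == 0:
--                     spf[m] = d
--     omega = [0] * (n + 1)
--     for i in range(2, n + 1):
--         omega[i] = omega[i // spf[i]] + 1
--     grundy = [0] * (n + 1)
--     for i in range(2, n + 1):
--         grundy[i] = 1 if omega[i] == 1 else omega[i] - 1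
--     return grundy
-- ===== Notes on version B (the rewrite author's own statement) =====
-- stated objective: alternative
-- what changed: A interleaves grundy updates (with overwrites and a final prime-fixup pass) inside a Sieve-of-Eratosthenes prime sieve; B instead builds a smallest-prime-factor table with a sieve and then derives each entry by two linear recurrence passes (omega[i] = omega[i // spf[i]] + 1, then a direct map of the factor counts).
-- outside the precondition, e.g. on calculate_grundy(0): A raises IndexError, B returns [0]; on calculate_grundy(-1): A raises IndexError, B returns []
import Mathlib
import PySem

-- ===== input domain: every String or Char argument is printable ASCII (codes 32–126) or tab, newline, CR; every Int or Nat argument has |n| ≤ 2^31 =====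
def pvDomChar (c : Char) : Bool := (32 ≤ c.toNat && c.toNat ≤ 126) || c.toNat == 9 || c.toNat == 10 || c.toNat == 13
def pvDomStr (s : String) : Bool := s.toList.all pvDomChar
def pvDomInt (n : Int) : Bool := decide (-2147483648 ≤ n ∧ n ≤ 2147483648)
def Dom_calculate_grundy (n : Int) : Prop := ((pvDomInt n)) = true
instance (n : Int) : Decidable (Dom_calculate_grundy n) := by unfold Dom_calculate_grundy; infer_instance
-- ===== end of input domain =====

-- B replaces A's prime sieve with interleaved grundy overwrites by a smallest-prime-factor
-- sieve plus two linear recurrence passes (alternative decomposition, same asymptotic cost).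

-- ===== PORT A =====
-- inner loop body: is_prime[multiple] = False; grundy[multiple] = grundy[multiple // p] + 1
-- (the two list writes are independent, performed here as one pair update; multiple // p on
-- nonnegative ints is Nat division, exact here)
def innerStepA (p : ℕ) (st : List Int × List Bool) (m : ℕ) : List Int × List Bool :=
  (st.1.set m (st.1.getD (m / p) 0 + 1), st.2.set m false)

-- one outer iteration: if is_prime[p]: for multiple in range(p*p, n+1, p): …
-- range(a, b, p) for p > 0 has max(0, ceil((b-a)/p)) elements = (b - a + (p-1)) / p in ℕ
def stepA (N : ℕ) (st : List Int × List Bool) (p : ℕ) : List Int × List Bool :=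
  if st.2.getD p false = true then
    (List.range' (p * p) ((N + 1 - p * p + (p - 1)) / p) p).foldl (innerStepA p) st
  else st

-- final loop body: if is_prime[i]: grundy[i] = 1
def finStepA (pr : List Bool) (g : List Int) (i : ℕ) : List Int :=
  if pr.getD i false = true then g.set i 1 else g

def calculate_grundy (n : Int) : List Int :=
  if n < 1 then []  -- Python raises IndexError here (is_prime[0]/is_prime[1] on a too-short list); excluded by Pre_
  else
    let N := n.toNat
    -- grundy = [0]*(n+1); is_prime = [True]*(n+1); is_prime[0] = is_prime[1] = False
    let st := (List.range' 2 (N - 1)).foldl (stepA N)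
      (List.replicate (N + 1) (0 : Int),
       ((List.replicate (N + 1) true).set 0 false).set 1 false)
    (List.range' 2 (N - 1)).foldl (finStepA st.2) st.1

-- ===== PORT B =====
-- spf sieve inner body: if spf[m] == 0: spf[m] = d  (indices/values are nonnegative ints,
-- kept as ℕ in this helper list; the returned grundy list is List Int)
def innerStepB (d : ℕ) (spf : List ℕ) (m : ℕ) : List ℕ :=
  if spf.getD m 0 = 0 then spf.set m d else spf

def stepB (M : ℕ) (spf : List ℕ) (d : ℕ) : List ℕ :=
  if spf.getD d 0 = 0 then
    (List.range' d ((M - d + (d - 1)) / d) d).foldl (innerStepB d) spf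
  else spf

-- omega pass body: omega[i] = omega[i // spf[i]] + 1  (all quantities nonnegative, // = ℕ division)
def omStepB (spf : List ℕ) (om : List ℕ) (i : ℕ) : List ℕ :=
  om.set i (om.getD (i / spf.getD i 0) 0 + 1)

-- grundy pass body: grundy[i] = 1 if omega[i] == 1 else omega[i] - 1
def gStepB (om : List ℕ) (g : List Int) (i : ℕ) : List Int :=
  g.set i (if om.getD i 0 = 1 then 1 else (om.getD i 0 : Int) - 1)

def calculate_grundy_alt (n : Int) : List Int :=
  let M := (n + 1).toNat  -- len([0]*(n+1)) (0 when n + 1 < 0); all three loops run over range(2, n+1)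
  let spf := (List.range' 2 (M - 2)).foldl (stepB M) (List.replicate M (0 : ℕ))
  let om := (List.range' 2 (M - 2)).foldl (omStepB spf) (List.replicate M (0 : ℕ))
  (List.range' 2 (M - 2)).foldl (gStepB om) (List.replicate M (0 : Int))

-- ===== PRECONDITION & SPEC =====
-- Pre_ excludes exactly n ≤ 0, where Python A raises IndexError (is_prime[0] = is_prime[1] = False
-- on a list of length n+1 ≤ 1).
def Pre_calculate_grundy (n : Int) : Prop := 1 ≤ n
instance (n : Int) : Decidable (Pre_calculate_grundy n) := by unfold Pre_calculate_grundy; infer_instance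
def pvWitness_calculate_grundy : Int := 12

def Spec_calculate_grundy (n : Int) (out : List Int) : Prop := out = calculate_grundy_alt n
instance (n : Int) (out : List Int) : Decidable (Spec_calculate_grundy n out) := by unfold Spec_calculate_grundy; infer_instance

-- ===== CLAIM (what is proved, stated in full; the proofs are below) =====
def Claim_equal_calculate_grundy : Prop := ∀ (n : Int), Dom_calculate_grundy n → Pre_calculate_grundy n → Spec_calculate_grundy n (calculate_grundy n)

-- ===== LEMMAS AND PROOFS =====

def Om (m : ℕ) : ℕ := m.primeFactorsList.length
def valN (i : ℕ) : Int := if i < 2 then 0 else if i.Prime then 1 else (Om i : Int) - 1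
def Comp (i : ℕ) : Prop := 2 ≤ i ∧ ¬ i.Prime
def Q (q i : ℕ) : Prop := q.Prime ∧ q ∣ i ∧ q * q ≤ i

theorem Om_step (m : ℕ) (h : 2 ≤ m) : Om m = Om (m / m.minFac) + 1 := by
  obtain ⟨k, rfl⟩ : ∃ k, m = k + 2 := ⟨m - 2, by omega⟩
  rw [Om, Nat.primeFactorsList, List.length_cons]; rfl

theorem Om_pos (m : ℕ) (h : 2 ≤ m) : 1 ≤ Om m := by rw [Om_step m h]; omega

theorem Om_lt2 (m : ℕ) (h : m < 2) : Om m = 0 := by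
  interval_cases m <;> simp [Om]

theorem Om_prime (p : ℕ) (h : p.Prime) : Om p = 1 := by
  rw [Om, Nat.primeFactorsList_prime h]; rfl

theorem minFac_lt_of_comp (i : ℕ) (h : Comp i) : i.minFac < i := by
  obtain ⟨h2, hnp⟩ := h
  have hd := Nat.minFac_dvd i
  have hp := Nat.minFac_prime (by omega : i ≠ 1)
  have hle := Nat.le_of_dvd (by omega) hd
  rcases lt_or_eq_of_le hle with h' | h'
  · exact h'
  · exact absurd (h' ▸ hp) hnp

theorem Om_div_prime (p m : ℕ) (hp : p.Prime) (hd : p ∣ m) (hm : m ≠ 0) :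
    Om m = Om (m / p) + 1 := by
  have hq : m / p ≠ 0 := Nat.div_ne_zero_iff.mpr ⟨hp.pos.ne', Nat.le_of_dvd (Nat.pos_of_ne_zero hm) hd⟩
  have hmul : m = p * (m / p) := (Nat.mul_div_cancel' hd).symm
  have hperm := Nat.perm_primeFactorsList_mul (a := p) (b := m / p) hp.pos.ne' hq
  have : Om m = (p.primeFactorsList ++ (m / p).primeFactorsList).length := by
    rw [Om]
    conv_lhs => rw [hmul]
    exact hperm.length_eq
  rw [this, List.length_append, Nat.primeFactorsList_prime hp]
  simp [Om, Nat.add_comm]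

theorem Om_eq_one_iff (m : ℕ) (h : 2 ≤ m) : Om m = 1 ↔ m.Prime := by
  constructor
  · intro h1
    have hs := Om_step m h
    have h0 : Om (m / m.minFac) = 0 := by omega
    have hlt : m / m.minFac < 2 := by
      by_contra hge
      have := Om_pos (m / m.minFac) (by omega)
      omega
    have hd := Nat.minFac_dvd m
    have h1' : 1 ≤ m / m.minFac := Nat.one_le_div_iff (Nat.minFac_pos m) |>.mpr (Nat.le_of_dvd (by omega) hd)
    have hm1 : m / m.minFac = 1 := by omega
    have hmc := Nat.div_mul_cancel hd
    have : m = m.minFac := by rw [hm1, one_mul] at hmc; omega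
    exact this ▸ Nat.minFac_prime (by omega)
  · exact Om_prime m

theorem comp_has_Q (i : ℕ) (h : Comp i) : Q i.minFac i := by
  obtain ⟨h2i, hnp⟩ := h
  refine ⟨Nat.minFac_prime (by omega : i ≠ 1), Nat.minFac_dvd i, ?_⟩
  have := Nat.minFac_sq_le_self (by omega : 0 < i) hnp
  nlinarith [this]

theorem prime_no_Q (i q : ℕ) (hp : i.Prime) : ¬ Q q i := by
  rintro ⟨hq, hd, hsq⟩
  rcases (Nat.Prime.eq_one_or_self_of_dvd hp q hd) with h | h
  · exact absurd (h ▸ hq) Nat.not_prime_one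
  · subst h; nlinarith [hp.two_le]

theorem Q_le (q i : ℕ) (h : Q q i) : q ≤ i := by
  nlinarith [h.2.2, h.1.two_le]

def targ (N : ℕ) : List Int := (List.range (N + 1)).map valN

-- ---- list access helpers ----
theorem getD_set_self {α : Type} (l : List α) (i : ℕ) (v d : α) (h : i < l.length) :
    (l.set i v).getD i d = v := by
  simp [List.getD, h]

theorem getD_set_ne {α : Type} (l : List α) (i j : ℕ) (v d : α) (h : i ≠ j) :
    (l.set i v).getD j d = l.getD j d := by
  simp [List.getD, List.getElem?_set_ne h]

-- p ∣ i, p ∣ m, i < m + p, i ≠ m imply i < m (multiples of p are p apart)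
theorem dvd_lt_add (p i m : ℕ) (hp : 0 < p) (hi : p ∣ i) (hm : p ∣ m)
    (h1 : i < m + p) (h2 : i ≠ m) : i < m := by
  obtain ⟨a, rfl⟩ := hi; obtain ⟨b, rfl⟩ := hm
  have hab : a < b + 1 := by
    rcases Nat.lt_or_ge a (b + 1) with h' | hge
    · exact h'
    · have h3 : p * (b + 1) ≤ p * a := Nat.mul_le_mul_left p hge
      rw [Nat.mul_add, Nat.mul_one] at h3
      omega
  have hne : a ≠ b := by rintro rfl; omega
  exact Nat.mul_lt_mul_left hp |>.mpr (by omega)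

-- Python range(a, N+1, p) : every element is ≤ N, and the range covers all such multiples
theorem range_arith (N a p : ℕ) (hp : 1 ≤ p) :
    (∀ m ∈ List.range' a ((N + 1 - a + (p - 1)) / p) p, m ≤ N) ∧
      N < a + ((N + 1 - a + (p - 1)) / p) * p := by
  have hdm := Nat.div_add_mod (N + 1 - a + (p - 1)) p
  have hr : (N + 1 - a + (p - 1)) % p < p := Nat.mod_lt _ (by omega)
  constructor
  · intro m hm
    rw [List.mem_range'] at hm
    obtain ⟨j, hj, rfl⟩ := hm
    have h1 : p * (j + 1) ≤ p * ((N + 1 - a + (p - 1)) / p) := Nat.mul_le_mul_left p (by omega)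
    rw [Nat.mul_add, Nat.mul_one] at h1
    omega
  · have hcomm : ((N + 1 - a + (p - 1)) / p) * p = p * ((N + 1 - a + (p - 1)) / p) :=
      Nat.mul_comm _ _
    omega

-- ---- A-side sieve invariant ----
def Marked (p M i : ℕ) : Prop := ∃ q, Q q i ∧ (q < p ∨ (q = p ∧ i < M))
def DoneA (p M i : ℕ) : Prop := ∀ q, Q q i → (q < p ∨ (q = p ∧ i < M))

def InvA (N p M : ℕ) (st : List Int × List Bool) : Prop :=
  st.1.length = N + 1 ∧ st.2.length = N + 1 ∧
  (∀ i, i ≤ N → ¬ Comp i → st.1.getD i 0 = 0) ∧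
  (∀ i, i ≤ N → Comp i → DoneA p M i → st.1.getD i 0 = (Om i : Int) - 1) ∧
  (∀ i, i ≤ N → (st.2.getD i false = true ↔ (2 ≤ i ∧ ¬ Marked p M i)))

theorem innerA_step (N p m : ℕ) (hp : p.Prime) (hpp : p * p ≤ m) (hd : p ∣ m) (hmN : m ≤ N)
    (st : List Int × List Bool) (h : InvA N p m st) :
    InvA N p (m + p) (innerStepA p st m) := by
  obtain ⟨hl1, hl2, h3, h4, h5⟩ := h
  have hp2 := hp.two_le
  have hppos : 0 < p := by omega
  have hplt : p < m := by nlinarith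
  have hm2 : 2 ≤ m := by omega
  have hmlen1 : m < st.1.length := by omega
  have hmlen2 : m < st.2.length := by omega
  have hnpm : ¬ m.Prime := by
    intro hpr
    rcases hpr.eq_one_or_self_of_dvd p hd with h' | h' <;> omega
  have hCompm : Comp m := ⟨hm2, hnpm⟩
  have hQpm : Q p m := ⟨hp, hd, hpp⟩
  have hdlt : m / p < m := Nat.div_lt_self (by omega) (by omega)
  have hdge : p ≤ m / p := (Nat.le_div_iff_mul_le hppos).mpr hpp
  refine ⟨?_, ?_, ?_, ?_, ?_⟩
  · simp [innerStepA, hl1]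
  · simp [innerStepA, hl2]
  · intro i hi hc
    simp only [innerStepA]
    rcases eq_or_ne i m with rfl | hne
    · exact absurd hCompm hc
    · rw [getD_set_ne _ _ _ _ _ (Ne.symm hne)]
      exact h3 i hi hc
  · intro i hi hc hdone
    simp only [innerStepA]
    rcases eq_or_ne i m with rfl | hne
    · rw [getD_set_self _ _ _ _ hmlen1]
      have hOm : Om i = Om (i / p) + 1 := Om_div_prime p i hp hd (by omega)
      by_cases hc2 : Comp (i / p)
      · have hdone2 : DoneA p i (i / p) := by
          intro q hq
          have hqd : q ∣ i := hq.2.1.trans ⟨p, (Nat.div_mul_cancel hd).symm⟩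
          have hqm : Q q i := ⟨hq.1, hqd, le_trans hq.2.2 (Nat.div_le_self i p)⟩
          rcases hdone q hqm with h' | ⟨rfl, _⟩
          · exact Or.inl h'
          · exact Or.inr ⟨rfl, hdlt⟩
        rw [h4 (i / p) (by omega) hc2 hdone2, hOm]
        push_cast; ring
      · have hz := h3 (i / p) (by omega) hc2
        rw [hz]
        have hprq : (i / p).Prime := by
          by_contra hnp
          exact hc2 ⟨by omega, hnp⟩
        rw [hOm, Om_prime _ hprq]
        norm_num
    · rw [getD_set_ne _ _ _ _ _ (Ne.symm hne)]
      apply h4 i hi hc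
      intro q hq
      rcases hdone q hq with h' | ⟨heq, hlt⟩
      · exact Or.inl h'
      · exact Or.inr ⟨heq, dvd_lt_add p i m hppos (heq ▸ hq.2.1) hd hlt hne⟩
  · intro i hi
    simp only [innerStepA]
    rcases eq_or_ne i m with rfl | hne
    · rw [getD_set_self _ _ _ _ hmlen2]
      have hmk : Marked p (i + p) i := ⟨p, hQpm, Or.inr ⟨rfl, by omega⟩⟩
      simp only [Bool.false_eq_true, false_iff]
      rintro ⟨-, hnm⟩
      exact hnm hmk
    · rw [getD_set_ne _ _ _ _ _ (Ne.symm hne)]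
      rw [h5 i hi]
      constructor
      · rintro ⟨h2i, hnm⟩
        refine ⟨h2i, ?_⟩
        rintro ⟨q, hq, hor⟩
        apply hnm
        refine ⟨q, hq, ?_⟩
        rcases hor with h' | ⟨heq, hlt⟩
        · exact Or.inl h'
        · exact Or.inr ⟨heq, dvd_lt_add p i m hppos (heq ▸ hq.2.1) hd hlt hne⟩
      · rintro ⟨h2i, hnm⟩
        refine ⟨h2i, ?_⟩
        rintro ⟨q, hq, hor⟩
        apply hnm
        refine ⟨q, hq, ?_⟩
        rcases hor with h' | ⟨heq, hlt⟩
        · exact Or.inl h'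
        · exact Or.inr ⟨heq, by omega⟩

theorem innerA_fold (N p : ℕ) (hp : p.Prime) :
    ∀ (k a : ℕ), p * p ≤ a → p ∣ a → (∀ m ∈ List.range' a k p, m ≤ N) →
    ∀ st, InvA N p a st →
      InvA N p (a + k * p) ((List.range' a k p).foldl (innerStepA p) st) := by
  intro k
  induction k with
  | zero => intro a _ _ _ st hinv; simpa using hinv
  | succ k ih =>
    intro a hpp hd hmem st hinv
    rw [List.range'_succ]
    simp only [List.foldl_cons]
    have haN : a ≤ N := hmem a (by rw [List.range'_succ]; exact List.mem_cons_self)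
    have h1 := innerA_step N p a hp hpp hd haN st hinv
    have h2 := ih (a + p) (by omega) (Nat.dvd_add hd (dvd_refl p))
      (fun m hm => hmem m (by rw [List.range'_succ]; exact List.mem_cons_of_mem _ hm))
      (innerStepA p st a) h1
    have harr : a + (k + 1) * p = (a + p) + k * p := by ring
    rw [harr]
    exact h2

theorem advanceA (N p M : ℕ) (hM : N < M) (st : List Int × List Bool) (h : InvA N p M st) :
    InvA N (p + 1) ((p + 1) * (p + 1)) st := by
  obtain ⟨hl1, hl2, h3, h4, h5⟩ := h
  have key : ∀ i q, i ≤ N → Q q i →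
      ((q < p ∨ (q = p ∧ i < M)) ↔ (q < p + 1 ∨ (q = p + 1 ∧ i < (p + 1) * (p + 1)))) := by
    intro i q hi hq
    have hqq := hq.2.2
    constructor
    · rintro (h' | ⟨rfl, -⟩)
      · exact Or.inl (by omega)
      · exact Or.inl (by omega)
    · rintro (h' | ⟨rfl, hlt⟩)
      · rcases Nat.lt_or_ge q p with h'' | h''
        · exact Or.inl h''
        · exact Or.inr ⟨by omega, by omega⟩
      · exact absurd hqq (by omega)
  refine ⟨hl1, hl2, h3, ?_, ?_⟩
  · intro i hi hc hdone
    exact h4 i hi hc (fun q hq => (key i q hi hq).mpr (hdone q hq))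
  · intro i hi
    rw [h5 i hi]
    have hmk : Marked p M i ↔ Marked (p + 1) ((p + 1) * (p + 1)) i := by
      constructor
      · rintro ⟨q, hq, hor⟩; exact ⟨q, hq, (key i q hi hq).mp hor⟩
      · rintro ⟨q, hq, hor⟩; exact ⟨q, hq, (key i q hi hq).mpr hor⟩
    rw [hmk]

theorem advanceA_comp (N p : ℕ) (hnp : ¬ p.Prime) (st : List Int × List Bool)
    (h : InvA N p (p * p) st) : InvA N (p + 1) ((p + 1) * (p + 1)) st := by
  obtain ⟨hl1, hl2, h3, h4, h5⟩ := h
  have key : ∀ i q, Q q i →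
      ((q < p ∨ (q = p ∧ i < p * p)) ↔ (q < p + 1 ∨ (q = p + 1 ∧ i < (p + 1) * (p + 1)))) := by
    intro i q hq
    have hqq := hq.2.2
    constructor
    · rintro (h' | ⟨rfl, hlt⟩)
      · exact Or.inl (by omega)
      · exact absurd hqq (by omega)
    · rintro (h' | ⟨rfl, hlt⟩)
      · rcases eq_or_ne q p with rfl | hne
        · exact absurd hq.1 hnp
        · exact Or.inl (by omega)
      · exact absurd hqq (by omega)
  refine ⟨hl1, hl2, h3, ?_, ?_⟩
  · intro i hi hc hdone
    exact h4 i hi hc (fun q hq => (key i q hq).mpr (hdone q hq))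
  · intro i hi
    rw [h5 i hi]
    have hmk : Marked p (p * p) i ↔ Marked (p + 1) ((p + 1) * (p + 1)) i := by
      constructor
      · rintro ⟨q, hq, hor⟩; exact ⟨q, hq, (key i q hq).mp hor⟩
      · rintro ⟨q, hq, hor⟩; exact ⟨q, hq, (key i q hq).mpr hor⟩
    rw [hmk]

theorem prA_iff (N p : ℕ) (hp2 : 2 ≤ p) (hpN : p ≤ N) (st : List Int × List Bool)
    (h : InvA N p (p * p) st) : (st.2.getD p false = true) ↔ p.Prime := by
  obtain ⟨-, -, -, -, h5⟩ := h
  rw [h5 p hpN]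
  constructor
  · rintro ⟨h2p, hnm⟩
    by_contra hnp
    have hc : Comp p := ⟨h2p, hnp⟩
    exact hnm ⟨p.minFac, comp_has_Q p hc, Or.inl (minFac_lt_of_comp p hc)⟩
  · intro hpr
    refine ⟨hp2, ?_⟩
    rintro ⟨q, hq, -⟩
    exact prime_no_Q p q hpr hq

theorem outerA_fold (N : ℕ) : ∀ (k p : ℕ) (st : List Int × List Bool), 2 ≤ p →
    (∀ q ∈ List.range' p k, q ≤ N) → InvA N p (p * p) st →
    InvA N (p + k) ((p + k) * (p + k)) ((List.range' p k).foldl (stepA N) st) := by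
  intro k
  induction k with
  | zero => intro p st _ _ hinv; simpa using hinv
  | succ k ih =>
    intro p st hp2 hmem hinv
    rw [List.range'_succ]
    simp only [List.foldl_cons]
    have hpN : p ≤ N := hmem p (by rw [List.range'_succ]; exact List.mem_cons_self)
    have hnext : InvA N (p + 1) ((p + 1) * (p + 1)) (stepA N st p) := by
      unfold stepA
      by_cases hpr : p.Prime
      · rw [if_pos ((prA_iff N p hp2 hpN st hinv).mpr hpr)]
        obtain ⟨hmemr, hcover⟩ := range_arith N (p * p) p (by omega)
        have hfold := innerA_fold N p hpr _ (p * p) (le_refl _) ⟨p, rfl⟩ hmemr st hinv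
        exact advanceA N p _ hcover _ hfold
      · rw [if_neg (fun hc => hpr ((prA_iff N p hp2 hpN st hinv).mp hc))]
        exact advanceA_comp N p hpr st hinv
    have hrec := ih (p + 1) (stepA N st p) (by omega)
      (fun q hq => hmem q (by rw [List.range'_succ]; exact List.mem_cons_of_mem _ hq)) hnext
    have harr : p + (k + 1) = (p + 1) + k := by omega
    rw [harr]
    exact hrec

theorem finA_fold (pr : List Bool) : ∀ (k t : ℕ) (g : List Int), t + k ≤ g.length →
    ((List.range' t k).foldl (finStepA pr) g).length = g.length ∧
    ∀ i, ((List.range' t k).foldl (finStepA pr) g).getD i 0 =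
      if t ≤ i ∧ i < t + k ∧ pr.getD i false = true then 1 else g.getD i 0 := by
  intro k
  induction k with
  | zero =>
    intro t g _
    refine ⟨rfl, ?_⟩
    intro i
    rw [if_neg (by omega)]
    rfl
  | succ k ih =>
    intro t g hlen
    rw [List.range'_succ]
    simp only [List.foldl_cons]
    have hstep_len : (finStepA pr g t).length = g.length := by
      unfold finStepA; split <;> simp
    obtain ⟨ihlen, ihget⟩ := ih (t + 1) (finStepA pr g t) (by omega)
    refine ⟨by rw [ihlen, hstep_len], ?_⟩
    intro i
    rw [ihget i]
    by_cases hc : t + 1 ≤ i ∧ i < t + 1 + k ∧ pr.getD i false = true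
    · rw [if_pos hc, if_pos ⟨by omega, by omega, hc.2.2⟩]
    · rw [if_neg hc]
      by_cases hit : i = t
      · subst hit
        by_cases hpt : pr.getD i false = true
        · unfold finStepA
          rw [if_pos hpt, getD_set_self _ _ _ _ (by omega),
            if_pos ⟨le_refl _, by omega, hpt⟩]
        · unfold finStepA
          rw [if_neg hpt, if_neg (fun hcc => hpt hcc.2.2)]
      · have hstep_get : (finStepA pr g t).getD i 0 = g.getD i 0 := by
          unfold finStepA
          split
          · exact getD_set_ne _ _ _ _ _ (fun hh => hit hh.symm)
          · rfl
        rw [hstep_get,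
          if_neg (fun hcc => hc ⟨by omega, by omega, hcc.2.2⟩)]

-- ---- B-side spf-sieve invariant ----
def InvS (N d M : ℕ) (spf : List ℕ) : Prop :=
  spf.length = N + 1 ∧
  ∀ i, i ≤ N → spf.getD i 0 =
    (if 2 ≤ i ∧ (i.minFac < d ∨ (i.minFac = d ∧ i < M)) then i.minFac else 0)

theorem innerB_step (N d m : ℕ) (hd : d.Prime) (hdvd : d ∣ m) (hdm : d ≤ m) (hmN : m ≤ N)
    (spf : List ℕ) (h : InvS N d m spf) : InvS N d (m + d) (innerStepB d spf m) := by
  obtain ⟨hl, hv⟩ := h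
  have hd2 := hd.two_le
  have hm2 : 2 ≤ m := by omega
  have hmlen : m < spf.length := by omega
  have hmfle : m.minFac ≤ d := Nat.minFac_le_of_dvd hd2 hdvd
  have hmf2 : 2 ≤ m.minFac := (Nat.minFac_prime (by omega : m ≠ 1)).two_le
  refine ⟨by unfold innerStepB; split <;> simp [hl], ?_⟩
  intro i hi
  unfold innerStepB
  by_cases him : i = m
  · subst him
    rcases Nat.lt_or_ge i.minFac d with hlt | hge
    · have hne0 : spf.getD i 0 ≠ 0 := by
        rw [hv i hi, if_pos ⟨by omega, Or.inl hlt⟩]; omega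
      rw [if_neg hne0, hv i hi, if_pos ⟨by omega, Or.inl hlt⟩,
        if_pos ⟨by omega, Or.inl hlt⟩]
    · have heq : i.minFac = d := by omega
      have hz : spf.getD i 0 = 0 := by
        rw [hv i hi, if_neg]
        rintro ⟨-, hor⟩
        rcases hor with h' | ⟨-, h'⟩ <;> omega
      rw [if_pos hz, getD_set_self _ _ _ _ hmlen,
        if_pos ⟨by omega, Or.inr ⟨heq, by omega⟩⟩, heq]
  · have hget : (if spf.getD m 0 = 0 then spf.set m d else spf).getD i 0 = spf.getD i 0 := by
      split
      · exact getD_set_ne _ _ _ _ _ (fun hh => him hh.symm)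
      · rfl
    rw [hget, hv i hi]
    by_cases h2i : 2 ≤ i
    · by_cases hor : i.minFac < d
      · rw [if_pos ⟨h2i, Or.inl hor⟩, if_pos ⟨h2i, Or.inl hor⟩]
      · by_cases heq : i.minFac = d
        · have hdvi : d ∣ i := heq ▸ Nat.minFac_dvd i
          by_cases him2 : i < m
          · rw [if_pos ⟨h2i, Or.inr ⟨heq, him2⟩⟩, if_pos ⟨h2i, Or.inr ⟨heq, by omega⟩⟩]
          · rw [if_neg, if_neg]
            · rintro ⟨-, hor2⟩
              rcases hor2 with h' | ⟨-, h'⟩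
              · omega
              · exact him2 (dvd_lt_add d i m (by omega) hdvi hdvd h' him)
            · rintro ⟨-, hor2⟩
              rcases hor2 with h' | ⟨-, h'⟩ <;> omega
        · rw [if_neg, if_neg] <;>
            (rintro ⟨-, hor2⟩;
             rcases hor2 with h' | ⟨h', -⟩
             · exact hor h'
             · exact heq h')
    · rw [if_neg (fun hh => h2i hh.1), if_neg (fun hh => h2i hh.1)]

theorem innerB_fold (N d : ℕ) (hd : d.Prime) :
    ∀ (k a : ℕ), d ≤ a → d ∣ a → (∀ m ∈ List.range' a k d, m ≤ N) →
    ∀ spf, InvS N d a spf →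
      InvS N d (a + k * d) ((List.range' a k d).foldl (innerStepB d) spf) := by
  intro k
  induction k with
  | zero => intro a _ _ _ spf hinv; simpa using hinv
  | succ k ih =>
    intro a hda hdvd hmem spf hinv
    rw [List.range'_succ]
    simp only [List.foldl_cons]
    have haN : a ≤ N := hmem a (by rw [List.range'_succ]; exact List.mem_cons_self)
    have h1 := innerB_step N d a hd hdvd hda haN spf hinv
    have h2 := ih (a + d) (by omega) (Nat.dvd_add hdvd (dvd_refl d))
      (fun m hm => hmem m (by rw [List.range'_succ]; exact List.mem_cons_of_mem _ hm))
      (innerStepB d spf a) h1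
    have harr : a + (k + 1) * d = (a + d) + k * d := by ring
    rw [harr]
    exact h2

theorem advanceB (N d M : ℕ) (hM : N < M) (spf : List ℕ) (h : InvS N d M spf) :
    InvS N (d + 1) (d + 1) spf := by
  obtain ⟨hl, hv⟩ := h
  refine ⟨hl, ?_⟩
  intro i hi
  rw [hv i hi]
  by_cases h2i : 2 ≤ i
  · have hmfi : i.minFac ≤ i := Nat.minFac_le (by omega)
    rcases Nat.lt_or_ge i.minFac d with hlt | hge
    · rw [if_pos ⟨h2i, Or.inl hlt⟩, if_pos ⟨h2i, Or.inl (by omega)⟩]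
    · by_cases heq : i.minFac = d
      · rw [if_pos ⟨h2i, Or.inr ⟨heq, by omega⟩⟩, if_pos ⟨h2i, Or.inl (by omega)⟩]
      · have hnold : ¬ (2 ≤ i ∧ (i.minFac < d ∨ (i.minFac = d ∧ i < M))) := by
          rintro ⟨-, h' | ⟨h', -⟩⟩ <;> omega
        have hnnew : ¬ (2 ≤ i ∧ (i.minFac < d + 1 ∨ (i.minFac = d + 1 ∧ i < d + 1))) := by
          rintro ⟨-, h' | ⟨h', h''⟩⟩ <;> omega
        rw [if_neg hnold, if_neg hnnew]
  · rw [if_neg (fun hh => h2i hh.1), if_neg (fun hh => h2i hh.1)]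

theorem advanceB_comp (N d : ℕ) (_h2 : 2 ≤ d) (hnp : ¬ d.Prime) (spf : List ℕ)
    (h : InvS N d d spf) : InvS N (d + 1) (d + 1) spf := by
  obtain ⟨hl, hv⟩ := h
  refine ⟨hl, ?_⟩
  intro i hi
  rw [hv i hi]
  by_cases h2i : 2 ≤ i
  · have hmfp : (i.minFac).Prime := Nat.minFac_prime (by omega : i ≠ 1)
    have hmfi : i.minFac ≤ i := Nat.minFac_le (by omega)
    have hmfd : i.minFac ≠ d := fun he => hnp (he ▸ hmfp)
    by_cases hlt : i.minFac < d
    · rw [if_pos ⟨h2i, Or.inl hlt⟩, if_pos ⟨h2i, Or.inl (by omega)⟩]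
    · have hnold : ¬ (2 ≤ i ∧ (i.minFac < d ∨ (i.minFac = d ∧ i < d))) := by
        rintro ⟨-, h' | ⟨h', -⟩⟩ <;> omega
      have hnnew : ¬ (2 ≤ i ∧ (i.minFac < d + 1 ∨ (i.minFac = d + 1 ∧ i < d + 1))) := by
        rintro ⟨-, h' | ⟨h', h''⟩⟩ <;> omega
      rw [if_neg hnold, if_neg hnnew]
  · rw [if_neg (fun hh => h2i hh.1), if_neg (fun hh => h2i hh.1)]

theorem spfB_iff (N d : ℕ) (h2 : 2 ≤ d) (hdN : d ≤ N) (spf : List ℕ)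
    (h : InvS N d d spf) : (spf.getD d 0 = 0) ↔ d.Prime := by
  obtain ⟨-, hv⟩ := h
  rw [hv d hdN]
  by_cases hpr : d.Prime
  · rw [if_neg]
    · simp [hpr]
    · rintro ⟨-, hor⟩
      rcases hor with h' | ⟨-, h'⟩
      · rw [hpr.minFac_eq] at h'; omega
      · omega
  · have hc : Comp d := ⟨h2, hpr⟩
    have hlt := minFac_lt_of_comp d hc
    have hmf2 : 2 ≤ d.minFac := (Nat.minFac_prime (by omega : d ≠ 1)).two_le
    rw [if_pos ⟨h2, Or.inl hlt⟩]
    constructor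
    · intro h0; omega
    · intro hpr'; exact absurd hpr' hpr

theorem outerB_fold (N : ℕ) : ∀ (k d : ℕ) (spf : List ℕ), 2 ≤ d →
    (∀ q ∈ List.range' d k, q ≤ N) → InvS N d d spf →
    InvS N (d + k) (d + k) ((List.range' d k).foldl (stepB (N + 1)) spf) := by
  intro k
  induction k with
  | zero => intro d spf _ _ hinv; simpa using hinv
  | succ k ih =>
    intro d spf hd2 hmem hinv
    rw [List.range'_succ]
    simp only [List.foldl_cons]
    have hdN : d ≤ N := hmem d (by rw [List.range'_succ]; exact List.mem_cons_self)
    have hnext : InvS N (d + 1) (d + 1) (stepB (N + 1) spf d) := by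
      unfold stepB
      by_cases hpr : d.Prime
      · rw [if_pos ((spfB_iff N d hd2 hdN spf hinv).mpr hpr)]
        obtain ⟨hmemr, hcover⟩ := range_arith N d d (by omega)
        have hfold := innerB_fold N d hpr _ d (le_refl _) (dvd_refl d) hmemr spf hinv
        exact advanceB N (d + 1 - 1) _ hcover _ (by simpa using hfold)
      · rw [if_neg (fun hc => hpr ((spfB_iff N d hd2 hdN spf hinv).mp hc))]
        exact advanceB_comp N d hd2 hpr spf hinv
    have hrec := ih (d + 1) (stepB (N + 1) spf d) (by omega)
      (fun q hq => hmem q (by rw [List.range'_succ]; exact List.mem_cons_of_mem _ hq)) hnext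
    have harr : d + (k + 1) = (d + 1) + k := by omega
    rw [harr]
    exact hrec

theorem omB_fold (N : ℕ) (spf : List ℕ) (hspf : ∀ i, 2 ≤ i → i ≤ N → spf.getD i 0 = i.minFac) :
    ∀ (k t : ℕ) (om : List ℕ), 2 ≤ t → t + k ≤ N + 1 → om.length = N + 1 →
    (∀ i, i ≤ N → om.getD i 0 = if 2 ≤ i ∧ i < t then Om i else 0) →
    ((List.range' t k).foldl (omStepB spf) om).length = N + 1 ∧
    ∀ i, i ≤ N → ((List.range' t k).foldl (omStepB spf) om).getD i 0 =
      if 2 ≤ i ∧ i < t + k then Om i else 0 := by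
  intro k
  induction k with
  | zero =>
    intro t om _ _ hlen hch
    simp only [List.range'_zero, List.foldl_nil, Nat.add_zero]
    exact ⟨hlen, hch⟩
  | succ k ih =>
    intro t om h2t hbound hlen hch
    rw [List.range'_succ]
    simp only [List.foldl_cons]
    have htN : t ≤ N := by omega
    have hsp : spf.getD t 0 = t.minFac := hspf t h2t htN
    have hmf2 : 2 ≤ t.minFac := (Nat.minFac_prime (by omega : t ≠ 1)).two_le
    have hqlt : t / t.minFac < t := Nat.div_lt_self (by omega) (by omega)
    have homq : om.getD (t / spf.getD t 0) 0 = Om (t / t.minFac) := by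
      rw [hsp, hch _ (by omega)]
      by_cases h2q : 2 ≤ t / t.minFac
      · rw [if_pos ⟨h2q, by omega⟩]
      · rw [if_neg (by rintro ⟨h', -⟩; omega), Om_lt2 _ (by omega)]
    rw [show t + (k + 1) = t + 1 + k from by omega]
    apply ih (t + 1) (omStepB spf om t) (by omega) (by omega) (by simp [omStepB, hlen])
    intro i hi
    unfold omStepB
    by_cases hit : i = t
    · subst hit
      rw [getD_set_self _ _ _ _ (by omega), homq, ← Om_step i h2t,
        if_pos ⟨h2t, by omega⟩]
    · rw [getD_set_ne _ _ _ _ _ (fun hh => hit hh.symm), hch i hi]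
      have hiff : (2 ≤ i ∧ i < t) ↔ (2 ≤ i ∧ i < t + 1) := by
        constructor <;> (rintro ⟨a, b⟩; exact ⟨a, by omega⟩)
      simp only [hiff]

theorem gB_fold (N : ℕ) (om : List ℕ) (hom : ∀ i, 2 ≤ i → i ≤ N → om.getD i 0 = Om i) :
    ∀ (k t : ℕ) (g : List Int), 2 ≤ t → t + k ≤ N + 1 → g.length = N + 1 →
    (∀ i, i ≤ N → g.getD i 0 = if 2 ≤ i ∧ i < t then valN i else 0) →
    ((List.range' t k).foldl (gStepB om) g).length = N + 1 ∧
    ∀ i, i ≤ N → ((List.range' t k).foldl (gStepB om) g).getD i 0 =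
      if 2 ≤ i ∧ i < t + k then valN i else 0 := by
  intro k
  induction k with
  | zero =>
    intro t g _ _ hlen hch
    simp only [List.range'_zero, List.foldl_nil, Nat.add_zero]
    exact ⟨hlen, hch⟩
  | succ k ih =>
    intro t g h2t hbound hlen hch
    rw [List.range'_succ]
    simp only [List.foldl_cons]
    have htN : t ≤ N := by omega
    have hval : (if om.getD t 0 = 1 then (1 : Int) else (om.getD t 0 : Int) - 1) = valN t := by
      rw [hom t h2t htN]
      by_cases h1 : Om t = 1
      · rw [if_pos h1]
        simp [valN, (Om_eq_one_iff t h2t).mp h1, show ¬ t < 2 by omega]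
      · rw [if_neg (by exact_mod_cast h1)]
        have hnp : ¬ t.Prime := fun hp => h1 ((Om_eq_one_iff t h2t).mpr hp)
        simp [valN, hnp, show ¬ t < 2 by omega]
    rw [show t + (k + 1) = t + 1 + k from by omega]
    apply ih (t + 1) (gStepB om g t) (by omega) (by omega) (by simp [gStepB, hlen])
    intro i hi
    unfold gStepB
    by_cases hit : i = t
    · subst hit
      rw [getD_set_self _ _ _ _ (by omega), hval, if_pos ⟨h2t, by omega⟩]
    · rw [getD_set_ne _ _ _ _ _ (fun hh => hit hh.symm), hch i hi]
      have hiff : (2 ≤ i ∧ i < t) ↔ (2 ≤ i ∧ i < t + 1) := by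
        constructor <;> (rintro ⟨a, b⟩; exact ⟨a, by omega⟩)
      simp only [hiff]

theorem A_eq_targ (n : Int) (h : 1 ≤ n) : calculate_grundy n = targ n.toNat := by
  have hn0 : ¬ n < 1 := by omega
  simp only [calculate_grundy, if_neg hn0]
  set N := n.toNat with hNdef
  have hN1 : 1 ≤ N := by omega
  set g0 : List Int := List.replicate (N + 1) 0 with hg0
  set p0 : List Bool := ((List.replicate (N + 1) true).set 0 false).set 1 false with hp0
  have hinit : InvA N 2 4 (g0, p0) := by
    refine ⟨by simp [hg0], by simp [hp0], ?_, ?_, ?_⟩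
    · intro i hi _
      simp [hg0, List.getD, Nat.lt_succ_of_le hi]
    · intro i hi hc hdone
      exfalso
      obtain hq := comp_has_Q i hc
      rcases hdone i.minFac hq with h' | ⟨heq, hlt⟩
      · have := hq.1.two_le; omega
      · have hs := hq.2.2; rw [heq] at hs; omega
    · intro i hi
      have hnm : ¬ Marked 2 4 i := by
        rintro ⟨q, hq, hor⟩
        have h2q := hq.1.two_le
        have hs := hq.2.2
        rcases hor with h' | ⟨rfl, hlt⟩
        · omega
        · omega
      rcases Nat.lt_or_ge i 2 with h2 | h2
      · interval_cases i <;>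
          simp [hp0, List.getD, Nat.lt_succ_of_le hi]
      · have hv : p0.getD i false = true := by
          rw [hp0, getD_set_ne _ _ _ _ _ (by omega), getD_set_ne _ _ _ _ _ (by omega)]
          simp [List.getD, Nat.lt_succ_of_le hi]
        rw [hv]
        simp [h2, hnm]
  have hmem : ∀ q ∈ List.range' 2 (N - 1), q ≤ N := by
    intro q hq; rw [List.mem_range'_1] at hq; omega
  have hfold := outerA_fold N (N - 1) 2 (g0, p0) (le_refl 2) hmem hinit
  rw [show 2 + (N - 1) = N + 1 by omega] at hfold
  obtain ⟨hl1, hl2, h3, h4, h5⟩ := hfold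
  set st := (List.range' 2 (N - 1)).foldl (stepA N) (g0, p0) with hst
  have hpr : ∀ i, i ≤ N → (st.2.getD i false = true ↔ i.Prime) := by
    intro i hi
    rw [h5 i hi]
    constructor
    · rintro ⟨h2i, hnm⟩
      by_contra hnp
      have hc : Comp i := ⟨h2i, hnp⟩
      exact hnm ⟨i.minFac, comp_has_Q i hc, Or.inl (by
        have := minFac_lt_of_comp i hc; omega)⟩
    · intro hpri
      exact ⟨hpri.two_le, by rintro ⟨q, hq, -⟩; exact prime_no_Q i q hpri hq⟩
  have hdoneAll : ∀ i, i ≤ N → DoneA (N + 1) ((N + 1) * (N + 1)) i := by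
    intro i hi q hq
    exact Or.inl (by have := Q_le q i hq; omega)
  obtain ⟨hflen, hfget⟩ := finA_fold st.2 (N - 1) 2 st.1 (by omega)
  apply List.ext_getElem
  · rw [hflen, hl1]; simp [targ]
  · intro i hi1 hi2
    have hiN : i ≤ N := by rw [hflen, hl1] at hi1; omega
    have htg : (targ N)[i] = valN i := by
      simp [targ]
    rw [htg, ← List.getD_eq_getElem _ 0 hi1, hfget i]
    rcases Nat.lt_or_ge i 2 with h2 | h2
    · rw [if_neg (by omega)]
      rw [h3 i hiN (by rintro ⟨h2', -⟩; omega)]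
      simp [valN, h2]
    · by_cases hpri : i.Prime
      · rw [if_pos ⟨h2, by omega, (hpr i hiN).mpr hpri⟩]
        simp [valN, hpri, (show ¬ i < 2 by omega)]
      · have hc : Comp i := ⟨h2, hpri⟩
        rw [if_neg (fun hcond => hpri ((hpr i hiN).mp hcond.2.2))]
        rw [h4 i hiN hc (hdoneAll i hiN)]
        simp [valN, hpri, (show ¬ i < 2 by omega)]

theorem B_eq_targ (n : Int) (h : 1 ≤ n) : calculate_grundy_alt n = targ n.toNat := by
  simp only [calculate_grundy_alt]
  set N := n.toNat with hN
  have hN1 : 1 ≤ N := by omega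
  have hM : (n + 1).toNat = N + 1 := by omega
  rw [hM, show N + 1 - 2 = N - 1 from by omega]
  have hmem : ∀ q ∈ List.range' 2 (N - 1), q ≤ N := by
    intro q hq; rw [List.mem_range'_1] at hq; omega
  have hinit : InvS N 2 2 (List.replicate (N + 1) (0 : ℕ)) := by
    refine ⟨by simp, ?_⟩
    intro i hi
    have hz : (List.replicate (N + 1) (0 : ℕ)).getD i 0 = 0 := by
      simp [List.getD, Nat.lt_succ_of_le hi]
    rw [hz, if_neg]
    rintro ⟨h2i, hor⟩
    have := (Nat.minFac_prime (by omega : i ≠ 1)).two_le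
    rcases hor with h' | ⟨h', h''⟩ <;> omega
  have hfold := outerB_fold N (N - 1) 2 _ (le_refl 2) hmem hinit
  rw [show 2 + (N - 1) = N + 1 from by omega] at hfold
  obtain ⟨hslen, hsv⟩ := hfold
  set spf := (List.range' 2 (N - 1)).foldl (stepB (N + 1)) (List.replicate (N + 1) 0) with hspfdef
  have hspf : ∀ i, 2 ≤ i → i ≤ N → spf.getD i 0 = i.minFac := by
    intro i h2i hi
    rw [hsv i hi, if_pos ⟨h2i, Or.inl (by
      have : i.minFac ≤ i := Nat.minFac_le (by omega)
      omega)⟩]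
  have hominit : ∀ i, i ≤ N → (List.replicate (N + 1) (0 : ℕ)).getD i 0 =
      if 2 ≤ i ∧ i < 2 then Om i else 0 := by
    intro i hi
    rw [if_neg (by omega)]
    simp [List.getD, Nat.lt_succ_of_le hi]
  obtain ⟨holen, hov⟩ := omB_fold N spf hspf (N - 1) 2 (List.replicate (N + 1) 0)
    (le_refl 2) (by omega) (by simp) hominit
  set om := (List.range' 2 (N - 1)).foldl (omStepB spf) (List.replicate (N + 1) 0) with homdef
  have hom : ∀ i, 2 ≤ i → i ≤ N → om.getD i 0 = Om i := by
    intro i h2i hi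
    rw [hov i hi, if_pos ⟨h2i, by omega⟩]
  have hginit : ∀ i, i ≤ N → (List.replicate (N + 1) (0 : Int)).getD i 0 =
      if 2 ≤ i ∧ i < 2 then valN i else 0 := by
    intro i hi
    rw [if_neg (by omega)]
    simp [List.getD, Nat.lt_succ_of_le hi]
  obtain ⟨hglen, hgv⟩ := gB_fold N om hom (N - 1) 2 (List.replicate (N + 1) 0)
    (le_refl 2) (by omega) (by simp) hginit
  apply List.ext_getElem
  · rw [hglen]; simp [targ]
  · intro i hi1 hi2
    have hiN : i ≤ N := by rw [hglen] at hi1; omega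
    have htg : (targ N)[i] = valN i := by simp [targ]
    rw [htg, ← List.getD_eq_getElem _ 0 hi1, hgv i hiN]
    rcases Nat.lt_or_ge i 2 with h2 | h2
    · rw [if_neg (by omega)]
      simp [valN, h2]
    · rw [if_pos ⟨h2, by omega⟩]

-- ===== VERDICT (by name: the statement is the Claim_ definition above) =====
theorem calculate_grundy_spec : Claim_equal_calculate_grundy := by
  intro n _ hpre
  unfold Spec_calculate_grundy
  rw [A_eq_targ n hpre, B_eq_targ n hpre]
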